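-- pv_equiv track=rewrite | github.com/hackwoman/monitoring-etl | services/health-engine/app/impact.py | _bfs_max_depth
-- ===== SOURCE A (Python) =====
-- from collections import deque
--
-- def _bfs_max_depth(start: str, adj: dict) -> int:
--     """BFS 遍历，返回最大深度。"""
--     visited = set()
--     queue = deque([(start, 0)])
--     visited.add(start)
--     max_depth = 0
--
--     while queue:
--         current, depth = queue.popleft()
--         max_depth = max(max_depth, depth)
--         for neighbor in adj.get(current, []):
--             if neighbor not in visited:
--                 visited.add(neighbor)
--                 queue.append((neighbor, depth + 1))
--
--     return max_depth
-- ===== SOURCE B (Python) =====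
-- def _bfs_max_depth(start: str, adj: dict) -> int:
--     """Level-order BFS: sweep whole frontiers, counting nonempty levels."""
--     visited = {start}
--     frontier = [start]
--     depth = 0
--     while frontier:
--         nxt = []
--         for node in frontier:
--             for nb in adj.get(node, []):
--                 if nb not in visited:
--                     visited.add(nb)
--                     nxt.append(nb)
--         if not nxt:
--             break
--         frontier = nxt
--         depth += 1
--     return depth
-- ===== Notes on version B (the rewrite author's own statement) =====
-- stated objective: simpler
-- what changed: Replaced A's per-node deque of (node, depth) pairs with a running max by a level-order sweep that keeps only the current frontier list and counts non-empty levels.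
import Mathlib
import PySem

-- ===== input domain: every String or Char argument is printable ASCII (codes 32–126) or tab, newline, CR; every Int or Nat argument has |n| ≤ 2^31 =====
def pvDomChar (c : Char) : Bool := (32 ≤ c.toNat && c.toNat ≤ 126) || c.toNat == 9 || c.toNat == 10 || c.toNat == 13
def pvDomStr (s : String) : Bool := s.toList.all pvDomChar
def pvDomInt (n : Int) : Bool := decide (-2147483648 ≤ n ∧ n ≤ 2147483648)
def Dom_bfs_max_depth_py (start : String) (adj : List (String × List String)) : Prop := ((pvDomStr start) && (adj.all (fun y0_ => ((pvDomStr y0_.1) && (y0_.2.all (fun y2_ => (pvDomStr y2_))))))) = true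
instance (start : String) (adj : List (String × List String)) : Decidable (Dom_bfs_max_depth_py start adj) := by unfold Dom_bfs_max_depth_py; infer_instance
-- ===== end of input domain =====

-- B replaces A's per-node (node, depth) deque and running max by a level-order sweep
-- that counts non-empty frontiers (objective: simpler; same asymptotic cost).

-- Shared primitive: adj.get(node, []) (a dict lookup, used verbatim by both Pythons).
def pvNbrs (adj : List (String × List String)) (k : String) : List String :=
  PySem.Dict.getD (PySem.Dict.mk adj) k []

-- Universe of nodes ever added to `visited` (all dict values); measure for termination.
def pvU (adj : List (String × List String)) : List String := adj.flatMap Prod.snd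

def pvUnseen (adj : List (String × List String)) (v : PySem.Set String) : Nat :=
  ((pvU adj).filter (fun x => decide (x ∉ v))).length

lemma pvUnseen_lt_of (adj : List (String × List String)) (v w : PySem.Set String)
    (h : ∀ y, y ∈ v → y ∈ w) (x : String) (hxU : x ∈ pvU adj) (hxv : x ∉ v) (hxw : x ∈ w) :
    pvUnseen adj w < pvUnseen adj v := by
  have hsub : List.Sublist ((pvU adj).filter (fun y => decide (y ∉ w)))
      ((pvU adj).filter (fun y => decide (y ∉ v))) := by
    apply List.monotone_filter_right
    intro a ha
    simp only [decide_eq_true_eq] at ha ⊢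
    exact fun hv => ha (h a hv)
  apply Nat.lt_of_le_of_ne hsub.length_le
  intro heq
  have heql := hsub.eq_of_length heq
  have hxin : x ∈ (pvU adj).filter (fun y => decide (y ∉ v)) :=
    List.mem_filter.mpr ⟨hxU, by simpa using hxv⟩
  rw [← heql] at hxin
  have := (List.mem_filter.mp hxin).2
  simp [hxw] at this

lemma pvNbrs_mem_U (adj : List (String × List String)) (k x : String)
    (hx : x ∈ pvNbrs adj k) : x ∈ pvU adj := by
  unfold pvNbrs PySem.Dict.getD PySem.Dict.get? at hx
  rcases hf : List.find? (fun p => p.1 == k) (PySem.Dict.mk adj).items with _ | p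
  · rw [hf] at hx; simp at hx
  · rw [hf] at hx
    simp only [Option.map_some, Option.getD_some] at hx
    have hp : p ∈ adj := List.mem_of_find?_eq_some hf
    exact List.mem_flatMap.mpr ⟨p, hp, hx⟩

-- ===== PORT A =====
-- inner `for neighbor in adj.get(current, [])` loop of A
def pvAInner (d : Int) (v : PySem.Set String) (q : List (String × Int)) (ns : List String) :
    PySem.Set String × List (String × Int) :=
  ns.foldl (fun st x => if st.1.contains x = true then st else (st.1.add x, st.2 ++ [(x, d + 1)])) (v, q)

lemma pvAInner_spec (adj : List (String × List String)) (d : Int) :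
    ∀ (ns : List String) (v : PySem.Set String) (q : List (String × Int)),
      (∀ x ∈ ns, x ∈ pvU adj) →
      pvUnseen adj (pvAInner d v q ns).1 ≤ pvUnseen adj v ∧
        (pvAInner d v q ns = (v, q) ∨ pvUnseen adj (pvAInner d v q ns).1 < pvUnseen adj v) := by
  intro ns
  induction ns with
  | nil => intro v q _; exact ⟨le_refl _, Or.inl rfl⟩
  | cons x ns ih =>
    intro v q hns
    by_cases hm : x ∈ v
    · simpa [pvAInner, List.foldl_cons, hm] using ih v q (fun y hy => hns y (List.mem_cons_of_mem _ hy))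
    · have hxv : x ∉ v := hm
      have hlt : pvUnseen adj (v.add x) < pvUnseen adj v :=
        pvUnseen_lt_of adj v (v.add x)
          (fun y hy => (PySem.Set.mem_add v x y).mpr (Or.inl hy))
          x (hns x (List.mem_cons_self)) hxv ((PySem.Set.mem_add v x x).mpr (Or.inr rfl))
      obtain ⟨ih1, _⟩ := ih (v.add x) (q ++ [(x, d + 1)]) (fun y hy => hns y (List.mem_cons_of_mem _ hy))
      constructor
      · simpa [pvAInner, List.foldl_cons, hm] using le_trans ih1 hlt.le
      · right
        simpa [pvAInner, List.foldl_cons, hm] using lt_of_le_of_lt ih1 hlt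

-- the `while queue:` loop of A (queue of (node, depth) pairs, running max)
def pvRunA (adj : List (String × List String)) (v : PySem.Set String)
    (queue : List (String × Int)) (maxd : Int) : Int :=
  match queue with
  | [] => maxd
  | (cur, dep) :: qs =>
      pvRunA adj (pvAInner dep v qs (pvNbrs adj cur)).1
        (pvAInner dep v qs (pvNbrs adj cur)).2 (max maxd dep)
termination_by (pvUnseen adj v, queue.length)
decreasing_by
  rcases (pvAInner_spec adj dep (pvNbrs adj cur) v qs (fun x hx => pvNbrs_mem_U adj cur x hx)).2 with heq | hlt
  · rw [heq]
    exact Prod.Lex.right _ (by simp)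
  · exact Prod.Lex.left _ _ hlt

def bfs_max_depth_py (start : String) (adj : List (String × List String)) : Int :=
  -- visited = set(); queue = deque([(start, 0)]); visited.add(start); max_depth = 0
  pvRunA adj (PySem.Set.add PySem.Set.empty start) [(start, 0)] 0

-- ===== PORT B =====
-- inner `for nb in adj.get(node, [])` loop of B (state: visited, next frontier)
def pvBInner (st : PySem.Set String × List String) (ns : List String) :
    PySem.Set String × List String :=
  ns.foldl (fun st x => if st.1.contains x = true then st else (st.1.add x, st.2 ++ [x])) st

-- `for node in frontier:` — collect the whole next frontier
def pvBCollect (adj : List (String × List String)) (st : PySem.Set String × List String)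
    (frontier : List String) : PySem.Set String × List String :=
  frontier.foldl (fun st node => pvBInner st (pvNbrs adj node)) st

lemma pvBInner_spec (adj : List (String × List String)) :
    ∀ (ns : List String) (st : PySem.Set String × List String),
      (∀ x ∈ ns, x ∈ pvU adj) →
      pvUnseen adj (pvBInner st ns).1 ≤ pvUnseen adj st.1 ∧
        (pvBInner st ns = st ∨ pvUnseen adj (pvBInner st ns).1 < pvUnseen adj st.1) := by
  intro ns
  induction ns with
  | nil => intro st _; exact ⟨le_refl _, Or.inl rfl⟩
  | cons x ns ih =>
    intro st hns
    by_cases hm : x ∈ st.1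
    · simpa [pvBInner, List.foldl_cons, hm] using ih st (fun y hy => hns y (List.mem_cons_of_mem _ hy))
    · have hxv : x ∉ st.1 := hm
      have hlt : pvUnseen adj (st.1.add x) < pvUnseen adj st.1 :=
        pvUnseen_lt_of adj st.1 (st.1.add x)
          (fun y hy => (PySem.Set.mem_add st.1 x y).mpr (Or.inl hy))
          x (hns x (List.mem_cons_self)) hxv ((PySem.Set.mem_add st.1 x x).mpr (Or.inr rfl))
      obtain ⟨ih1, _⟩ := ih (st.1.add x, st.2 ++ [x]) (fun y hy => hns y (List.mem_cons_of_mem _ hy))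
      constructor
      · simpa [pvBInner, List.foldl_cons, hm] using le_trans ih1 hlt.le
      · right
        simpa [pvBInner, List.foldl_cons, hm] using lt_of_le_of_lt ih1 hlt

lemma pvBCollect_spec (adj : List (String × List String)) :
    ∀ (frontier : List String) (st : PySem.Set String × List String),
      pvUnseen adj (pvBCollect adj st frontier).1 ≤ pvUnseen adj st.1 ∧
        (pvBCollect adj st frontier = st ∨
          pvUnseen adj (pvBCollect adj st frontier).1 < pvUnseen adj st.1) := by
  intro frontier
  induction frontier with
  | nil => intro st; exact ⟨le_refl _, Or.inl rfl⟩
  | cons f fs ih =>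
    intro st
    have hstep := pvBInner_spec adj (pvNbrs adj f) st (fun x hx => pvNbrs_mem_U adj f x hx)
    have hrest := ih (pvBInner st (pvNbrs adj f))
    have hfold : pvBCollect adj st (f :: fs) = pvBCollect adj (pvBInner st (pvNbrs adj f)) fs := rfl
    rw [hfold]
    rcases hstep.2 with heq | hlt
    · rw [heq]; exact ih st
    · exact ⟨le_trans hrest.1 hstep.1, Or.inr (lt_of_le_of_lt hrest.1 hlt)⟩

-- the `while frontier:` level loop of B
def pvRunB (adj : List (String × List String)) (v : PySem.Set String)
    (frontier : List String) (depth : Int) : Int :=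
  if frontier = [] then depth
  else if (pvBCollect adj (v, []) frontier).2 = [] then depth
  else pvRunB adj (pvBCollect adj (v, []) frontier).1 (pvBCollect adj (v, []) frontier).2 (depth + 1)
termination_by pvUnseen adj v
decreasing_by
  rcases (pvBCollect_spec adj frontier (v, [])).2 with heq | hlt
  · exact absurd (congrArg Prod.snd heq) (by simpa using ‹¬(pvBCollect adj (v, []) frontier).2 = []›)
  · exact hlt

def bfs_max_depth_py_alt (start : String) (adj : List (String × List String)) : Int :=
  -- visited = {start}; frontier = [start]; depth = 0
  pvRunB adj (PySem.Set.ofList [start]) [start] 0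

-- ===== PRECONDITION & SPEC =====
def Spec_bfs_max_depth_py (start : String) (adj : List (String × List String)) (out : Int) : Prop := out = bfs_max_depth_py_alt start adj
instance (start : String) (adj : List (String × List String)) (out : Int) : Decidable (Spec_bfs_max_depth_py start adj out) := by unfold Spec_bfs_max_depth_py; infer_instance

-- ===== CLAIM (what is proved, stated in full; the proofs are below) =====
def Claim_equal_bfs_max_depth_py : Prop := ∀ (start : String) (adj : List (String × List String)), Dom_bfs_max_depth_py start adj → Spec_bfs_max_depth_py start adj (bfs_max_depth_py start adj)

-- ===== LEMMAS AND PROOFS =====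

-- A's inner loop on a queue `P ++ L.map (·, d+1)` is B's inner loop on `L`, tagged with d+1.
lemma pvRel (d : Int) :
    ∀ (ns : List String) (v : PySem.Set String) (P : List (String × Int)) (L : List String),
      pvAInner d v (P ++ L.map (fun x => (x, d + 1))) ns =
        ((pvBInner (v, L) ns).1, P ++ (pvBInner (v, L) ns).2.map (fun x => (x, d + 1))) := by
  intro ns
  induction ns with
  | nil => intro v P L; rfl
  | cons x ns ih =>
    intro v P L
    by_cases hm : x ∈ v
    · simpa [pvAInner, pvBInner, List.foldl_cons, hm] using ih v P L
    · have h1 : (P ++ L.map (fun x => (x, d + 1))) ++ [(x, d + 1)] =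
          P ++ (L ++ [x]).map (fun x => (x, d + 1)) := by
        simp [List.append_assoc]
      have := ih (v.add x) P (L ++ [x])
      simpa [pvAInner, pvBInner, List.foldl_cons, hm, h1] using this

-- Running A on a level-boundary queue equals one B-level step.
lemma pvL1 (adj : List (String × List String)) :
    ∀ (F : List String) (v : PySem.Set String) (N : List String) (d : Int),
      pvRunA adj v (F.map (fun x => (x, d)) ++ N.map (fun x => (x, d + 1))) d =
        if (pvBCollect adj (v, N) F).2 = [] then d
        else pvRunA adj (pvBCollect adj (v, N) F).1
          ((pvBCollect adj (v, N) F).2.map (fun x => (x, d + 1))) (d + 1) := by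
  intro F
  induction F with
  | nil =>
    intro v N d
    have hcol : pvBCollect adj (v, N) [] = (v, N) := rfl
    rw [hcol]
    cases N with
    | nil => simp [pvRunA]
    | cons n ns =>
      have hne : (n :: ns : List String) ≠ [] := by simp
      rw [if_neg hne]
      simp only [List.map_cons, List.nil_append, List.map_nil]
      rw [pvRunA, pvRunA]
      have h1 : max d (d + 1) = d + 1 := max_eq_right (by omega)
      have h2 : max (d + 1) (d + 1) = d + 1 := max_self _
      rw [h1, h2]
  | cons f F' ih =>
    intro v N d
    have hq : (f :: F').map (fun x => (x, d)) ++ N.map (fun x => (x, d + 1)) =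
        (f, d) :: (F'.map (fun x => (x, d)) ++ N.map (fun x => (x, d + 1))) := by simp
    rw [hq, pvRunA]
    rw [pvRel d (pvNbrs adj f) v (F'.map (fun x => (x, d))) N]
    have hcol : pvBCollect adj (v, N) (f :: F') =
        pvBCollect adj (pvBInner (v, N) (pvNbrs adj f)) F' := rfl
    rw [hcol, max_self]
    exact ih (pvBInner (v, N) (pvNbrs adj f)).1 (pvBInner (v, N) (pvNbrs adj f)).2 d

lemma pvMain (adj : List (String × List String)) :
    ∀ (n : Nat) (v : PySem.Set String) (F : List String) (d : Int),
      pvUnseen adj v < n →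
      pvRunA adj v (F.map (fun x => (x, d))) d = pvRunB adj v F d := by
  intro n
  induction n with
  | zero => intro v F d h; omega
  | succ n ih =>
    intro v F d h
    rw [pvRunB]
    by_cases hF : F = []
    · subst hF; simp [pvRunA]
    · rw [if_neg hF]
      have hA : pvRunA adj v (F.map (fun x => (x, d))) d =
          if (pvBCollect adj (v, []) F).2 = [] then d
          else pvRunA adj (pvBCollect adj (v, []) F).1
            ((pvBCollect adj (v, []) F).2.map (fun x => (x, d + 1))) (d + 1) := by
        have := pvL1 adj F v [] d
        simpa using this
      rw [hA]
      by_cases h2 : (pvBCollect adj (v, []) F).2 = []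
      · rw [if_pos h2, if_pos h2]
      · rw [if_neg h2, if_neg h2]
        apply ih
        rcases (pvBCollect_spec adj F (v, [])).2 with heq | hlt
        · exact absurd (congrArg Prod.snd heq) (by simpa using h2)
        · have hlt' : pvUnseen adj (pvBCollect adj (v, []) F).1 < pvUnseen adj v := hlt
          omega

-- ===== VERDICT (by name: the statement is the Claim_ definition above) =====
theorem bfs_max_depth_py_spec : Claim_equal_bfs_max_depth_py := by
  unfold Claim_equal_bfs_max_depth_py Spec_bfs_max_depth_py
  intro start adj _
  unfold bfs_max_depth_py bfs_max_depth_py_alt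
  have hv : PySem.Set.add PySem.Set.empty start = PySem.Set.ofList [start] := rfl
  have hq : ([(start, (0 : Int))] : List (String × Int)) = [start].map (fun x => (x, (0 : Int))) := rfl
  rw [hv, hq]
  exact pvMain adj (pvUnseen adj (PySem.Set.ofList [start]) + 1) _ _ _ (Nat.lt_succ_self _)
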